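-- pv_equiv track=rewrite | github.com/InfectedRat/legendary-octo-doodle | 4.1 stepik.py | ebanyi_vasya
-- ===== SOURCE A (Python) =====
-- def ebanyi_vasya(n, m):
--     d = 0
--     i = 1
--     while n > 0:
--         n = n - 1
--         d = d + 1
--         if d == m * i:
--             n = n + 1
--             i = i + 1
--     return d
-- ===== SOURCE B (Python) =====
-- def ebanyi_vasya(n, m):
--     if n <= 0:
--         return 0
--     if m >= 2:
--         return n + (n - 1) // (m - 1)
--     return n
-- ===== Notes on version B (the rewrite author's own statement) =====
-- stated objective: faster
-- what changed: Replaced the burn-one-unit-at-a-time simulation loop with the closed form n + (n-1)//(m-1) (and the trivial answers 0 / n for n<=0 / m<=0).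
import Mathlib
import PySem

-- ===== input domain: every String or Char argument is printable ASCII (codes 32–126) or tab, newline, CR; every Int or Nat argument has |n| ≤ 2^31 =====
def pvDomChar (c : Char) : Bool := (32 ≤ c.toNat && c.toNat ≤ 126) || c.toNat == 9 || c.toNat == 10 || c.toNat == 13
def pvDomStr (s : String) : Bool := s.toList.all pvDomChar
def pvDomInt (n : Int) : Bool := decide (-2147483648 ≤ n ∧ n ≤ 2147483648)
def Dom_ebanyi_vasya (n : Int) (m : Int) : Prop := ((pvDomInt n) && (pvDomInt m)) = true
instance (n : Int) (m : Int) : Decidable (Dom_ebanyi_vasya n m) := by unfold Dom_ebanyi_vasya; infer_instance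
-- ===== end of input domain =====

-- B replaces A's unit-by-unit simulation loop with the closed form n + (n-1)//(m-1) (faster: O(1) vs O(answer)).
-- Pre_ excludes m = 1 with n > 0, where A's while loop never terminates.

-- ===== PORT A =====
-- A's while loop; the fuel argument only makes the recursion total and is provably
-- sufficient on every input admitted by Pre_.
def ebanyi_vasyaLoop (fuel : Nat) (n d i m : Int) : Int :=
  match fuel with
  | 0 => d
  | Nat.succ f =>
    if n > 0 then
      let n1 := n - 1
      let d1 := d + 1
      if d1 = m * i then ebanyi_vasyaLoop f (n1 + 1) d1 (i + 1) m
      else ebanyi_vasyaLoop f n1 d1 i m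
    else d

def ebanyi_vasya (n : Int) (m : Int) : Int :=
  ebanyi_vasyaLoop (2 * n).toNat.succ n 0 1 m

-- ===== PORT B =====
def ebanyi_vasya_alt (n : Int) (m : Int) : Int :=
  if n ≤ 0 then 0
  else if 2 ≤ m then n + PySem.Int.floordiv (n - 1) (m - 1)
  else n

-- ===== PRECONDITION & SPEC =====
-- Pre_ excludes exactly the inputs (n > 0 and m = 1) on which A's loop diverges.
def Pre_ebanyi_vasya (n : Int) (m : Int) : Prop := n ≤ 0 ∨ m ≠ 1
instance (n : Int) (m : Int) : Decidable (Pre_ebanyi_vasya n m) := by unfold Pre_ebanyi_vasya; infer_instance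
def pvWitness_ebanyi_vasya : Int × Int := (10, 3)

def Spec_ebanyi_vasya (n : Int) (m : Int) (out : Int) : Prop := out = ebanyi_vasya_alt n m
instance (n : Int) (m : Int) (out : Int) : Decidable (Spec_ebanyi_vasya n m out) := by unfold Spec_ebanyi_vasya; infer_instance

-- ===== CLAIM =====
def Claim_equal_ebanyi_vasya : Prop := ∀ (n : Int) (m : Int), Dom_ebanyi_vasya n m → Pre_ebanyi_vasya n m → Spec_ebanyi_vasya n m (ebanyi_vasya n m)

-- ===== LEMMAS AND PROOFS =====

-- For m ≥ 2 the loop, started in a state with stub distance r = m*i - d, 1 ≤ r ≤ m,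
-- returns d + n + (n - r + m - 1)/(m - 1) (0 for n ≤ 0), given enough fuel.
theorem loop_m2 (m : Int) (hm : 2 ≤ m) : ∀ (fuel : Nat) (n d i : Int),
    1 ≤ m * i - d → m * i - d ≤ m →
    (if n ≤ 0 then (0:Int) else n + (n - (m * i - d) + m - 1) / (m - 1)) ≤ (fuel : Int) →
    ebanyi_vasyaLoop fuel n d i m
      = d + (if n ≤ 0 then (0:Int) else n + (n - (m * i - d) + m - 1) / (m - 1)) := by
  intro fuel
  induction fuel with
  | zero =>
    intro n d i h1 h2 hf
    by_cases hn : n ≤ 0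
    · simp [ebanyi_vasyaLoop, hn]
    · exfalso
      have hq : 0 ≤ (n - (m * i - d) + m - 1) / (m - 1) :=
        Int.ediv_nonneg (by omega) (by omega)
      simp only [if_neg hn] at hf
      omega
  | succ f ih =>
    intro n d i h1 h2 hf
    by_cases hn : n ≤ 0
    · simp [ebanyi_vasyaLoop, show ¬ n > 0 by omega, hn]
    · have hn1 : 1 ≤ n := by omega
      simp only [ebanyi_vasyaLoop, if_pos (show n > 0 by omega)]
      by_cases hr : d + 1 = m * i
      · -- refill step: new stub distance is m
        simp only [if_pos hr]
        have hsimpl : n - 1 + 1 = n := by ring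
        rw [hsimpl]
        have hnew : m * (i + 1) - (d + 1) = m := by ring_nf; omega
        have hstep : (n - (m * i - d) + m - 1) / (m - 1)
            = (n - 1) / (m - 1) + 1 := by
          have := Int.add_mul_ediv_right (n - 1) 1 (show m - 1 ≠ 0 by omega)
          have harg : n - (m * i - d) + m - 1 = n - 1 + 1 * (m - 1) := by omega
          rw [harg, this]
        have := ih n (d + 1) (i + 1) (by omega) (by omega)
          (by
            rw [hnew]
            simp only [if_neg hn] at hf ⊢
            have harg2 : n - m + m - 1 = n - 1 := by ring
            rw [harg2]; omega)
        rw [this, hnew]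
        simp only [if_neg hn]
        have harg2 : n - m + m - 1 = n - 1 := by ring
        rw [harg2, hstep]; ring
      · -- normal burn: n and stub distance both decrease
        simp only [if_neg hr]
        have hr2 : 2 ≤ m * i - d := by omega
        have hnew : m * i - (d + 1) = (m * i - d) - 1 := by omega
        by_cases hone : n - 1 ≤ 0
        · -- last unit: child returns immediately
          have hz : (n - (m * i - d) + m - 1) / (m - 1) = 0 :=
            Int.ediv_eq_zero_of_lt (by omega) (by omega)
          have := ih (n - 1) (d + 1) i (by omega) (by omega)
            (by simp [hone])
          rw [this]
          simp [hone, if_neg hn, hz]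
          omega
        · have harg : n - 1 - (m * i - (d + 1)) + m - 1
              = n - (m * i - d) + m - 1 := by omega
          have := ih (n - 1) (d + 1) i (by omega) (by omega)
            (by
              simp only [if_neg hone, harg]
              simp only [if_neg hn] at hf
              omega)
          rw [this]
          simp only [if_neg hone, if_neg hn, harg]
          ring
-- For m ≤ 0 the refill branch never fires, so the loop just counts n down.
theorem loop_mle (m : Int) (hm : m ≤ 0) : ∀ (fuel : Nat) (n d i : Int),
    0 ≤ d → 1 ≤ i → n ≤ (fuel : Int) →
    ebanyi_vasyaLoop fuel n d i m = d + max n 0 := by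
  intro fuel
  induction fuel with
  | zero =>
    intro n d i hd hi hf
    simp only [Nat.cast_zero] at hf
    simp [ebanyi_vasyaLoop]
    omega
  | succ f ih =>
    intro n d i hd hi hf
    by_cases hn : n > 0
    · have hmi : m * i ≤ 0 := mul_nonpos_of_nonpos_of_nonneg hm (by omega)
      have hne : ¬ (d + 1 = m * i) := by omega
      simp only [ebanyi_vasyaLoop, if_pos hn, if_neg hne]
      have := ih (n - 1) (d + 1) i (by omega) hi (by push_cast at hf ⊢; omega)
      rw [this]; omega
    · simp [ebanyi_vasyaLoop, hn]
      omega

-- ===== VERDICT =====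
theorem ebanyi_vasya_spec : Claim_equal_ebanyi_vasya := by
  intro n m _ hpre
  unfold Spec_ebanyi_vasya ebanyi_vasya ebanyi_vasya_alt
  by_cases hn : n ≤ 0
  · simp [ebanyi_vasyaLoop, show ¬ n > 0 by omega, hn]
  · simp only [if_neg hn]
    by_cases hm : 2 ≤ m
    · have hr : m * 1 - 0 = m := by ring
      have hq1 : (n - 1) / (m - 1) ≤ n - 1 := Int.ediv_le_self (m - 1) (by omega)
      have hfuel : (if n ≤ 0 then (0:Int) else n + (n - (m * 1 - 0) + m - 1) / (m - 1))
          ≤ ((2 * n).toNat.succ : Int) := by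
        simp only [if_neg hn, hr]
        have harg : n - m + m - 1 = n - 1 := by ring
        rw [harg]
        have : (0:Int) ≤ 2 * n := by omega
        push_cast
        rw [Int.toNat_of_nonneg this]
        omega
      rw [loop_m2 m hm _ n 0 1 (by omega) (by omega) hfuel]
      simp only [if_neg hn, hr, if_pos hm]
      have harg : n - m + m - 1 = n - 1 := by ring
      rw [harg, PySem.Int.floordiv_eq_ediv_of_pos (by omega)]
      ring
    · have hm0 : m ≤ 0 := by
        rcases hpre with h | h
        · omega
        · omega
      rw [loop_mle m hm0 _ n 0 1 le_rfl (by omega)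
        (by push_cast; rw [Int.toNat_of_nonneg (by omega : (0:Int) ≤ 2*n)]; omega)]
      simp [if_neg hm]
      omega
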